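-- pv_equiv track=rewrite | github.com/taxigps/xbmc-addons-chinese | plugin.video.youku/default.py | trans_f
-- ===== SOURCE A (Python) =====
-- def trans_f(a, c):
--     """
--     :argument a: list
--     :param c:
--     :return:
--     """
--     b = []
--     for f in range(len(a)):
--         i = ord(a[f][0]) - 97 if "a" <= a[f] <= "z" else int(a[f]) + 26
--         e = 0
--         while e < 36:
--             if c[e] == i:
--                 i = e
--                 break
--             e += 1
--         v = i - 26 if i > 25 else chr(i + 97)
--         b.append(str(v))
--     return ''.join(b)
-- ===== SOURCE B (Python) =====
-- def trans_f(a, c):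
--     # Sort the (value, index) pairs of c[:36] once, then answer each element of a
--     # by a hand-written binary search (lower bound) instead of A's linear scan.
--     vals = sorted((x, e) for e, x in enumerate(c[:36]))
--     keys = [v for v, _ in vals]
--     n = len(keys)
--
--     def lookup(i):
--         lo, hi = 0, n
--         while lo < hi:
--             mid = (lo + hi) // 2
--             if keys[mid] < i:
--                 lo = mid + 1
--             else:
--                 hi = mid
--         if lo < n and keys[lo] == i:
--             return vals[lo][1]
--         return i
--
--     out = []
--     for s in a:
--         i = ord(s[0]) - 97 if "a" <= s <= "z" else int(s) + 26
--         i = lookup(i)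
--         out.append(str(i - 26) if i > 25 else chr(i + 97))
--     return ''.join(out)
-- ===== Notes on version B (the rewrite author's own statement) =====
-- stated objective: faster
-- what changed: A's per-element linear scan of c[0..35] is replaced by sorting the (value, index) pairs of c[:36] once and answering each element of a with a hand-written lower-bound binary search over the sorted keys (ties resolve to the smallest original index, matching A's first match).
import Mathlib
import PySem

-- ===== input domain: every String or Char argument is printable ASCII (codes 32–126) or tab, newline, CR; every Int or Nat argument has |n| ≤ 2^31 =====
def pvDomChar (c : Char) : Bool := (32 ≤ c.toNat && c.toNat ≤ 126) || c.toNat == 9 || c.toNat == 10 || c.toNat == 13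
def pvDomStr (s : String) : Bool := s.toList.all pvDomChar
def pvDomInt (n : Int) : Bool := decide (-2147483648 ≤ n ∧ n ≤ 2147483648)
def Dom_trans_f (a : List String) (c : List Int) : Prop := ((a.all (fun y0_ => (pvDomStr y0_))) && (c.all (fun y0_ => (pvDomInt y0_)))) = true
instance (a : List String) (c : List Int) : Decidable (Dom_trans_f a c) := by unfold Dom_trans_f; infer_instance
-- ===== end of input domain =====

-- B replaces A's per-element linear scan of c[0..35] by sorting the (value, index)
-- pairs of c[:36] once and answering each element by binary search (lower bound).

-- ===== PORT A =====
-- i = ord(a[f][0]) - 97 if "a" <= a[f] <= "z" else int(a[f]) + 26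
-- (string comparison: Python's <= on str is Lean's ≤ on List Char; the getD defaults
--  are only read where Python raises, which Pre_ excludes)
def pvAIdx (s : String) : Int :=
  if "a".toList ≤ s.toList ∧ s.toList ≤ "z".toList then (((PySem.List.pyGet? s.toList 0).getD 'a').toNat : Int) - 97
  else (PySem.Int.ofStr? s).getD 0 + 26

-- while e < 36: if c[e] == i: i = e; break; e += 1
def pvAWhile (c : List Int) (i : Int) (e : Nat) : Int :=
  if e < 36 then
    if (PySem.List.pyGet? c (e : Int)).getD 0 = i then (e : Int)
    else pvAWhile c i (e + 1)
  else i
termination_by 36 - e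

-- chr(i + 97) is ported by hand as Char.ofNat; exact for 0 ≤ i + 97 (Pre_ guarantees it)
def trans_f (a : List String) (c : List Int) : String :=
  PySem.Str.join "" (a.foldl (fun b s =>
    let i0 := pvAIdx s
    let i := pvAWhile c i0 0
    b ++ [if i > 25 then PySem.Int.toStr (i - 26) else String.singleton (Char.ofNat (i + 97).toNat)]) [])

-- ===== PORT B =====
-- vals = sorted((x, e) for e, x in enumerate(c[:36]))  (tuples compare lexicographically)
def pvBVals (c : List Int) : List (Int × Int) :=
  PySem.List.sorted2
    ((PySem.List.enumerate (PySem.List.slice c none (some 36))).map (fun ex => (ex.2, ex.1)))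
    (·.1) (·.2)

-- while lo < hi: mid = (lo + hi) // 2; if keys[mid] < i: lo = mid + 1 else: hi = mid
def pvBLoop (keys : List Int) (i : Int) (lo hi : Nat) : Nat :=
  if lo < hi then
    if (PySem.List.pyGet? keys (((lo + hi) / 2 : Nat) : Int)).getD 0 < i then
      pvBLoop keys i ((lo + hi) / 2 + 1) hi
    else pvBLoop keys i lo ((lo + hi) / 2)
  else lo
termination_by hi - lo

-- if lo < n and keys[lo] == i: return vals[lo][1]; return i
def pvBLookup (vals : List (Int × Int)) (keys : List Int) (i : Int) : Int :=
  let lo := pvBLoop keys i 0 keys.length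
  if lo < keys.length then
    if (PySem.List.pyGet? keys (lo : Int)).getD 0 = i then
      ((PySem.List.pyGet? vals (lo : Int)).getD (0, 0)).2
    else i
  else i

-- i = ord(s[0]) - 97 if "a" <= s <= "z" else int(s) + 26   (same expression as in Source B)
def pvBIdx (s : String) : Int :=
  if "a".toList ≤ s.toList ∧ s.toList ≤ "z".toList then (((PySem.List.pyGet? s.toList 0).getD 'a').toNat : Int) - 97
  else (PySem.Int.ofStr? s).getD 0 + 26

def trans_f_alt (a : List String) (c : List Int) : String :=
  let vals := pvBVals c
  let keys := vals.map (·.1)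
  PySem.Str.join "" (a.foldl (fun out s =>
    let i := pvBLookup vals keys (pvBIdx s)
    out ++ [if i > 25 then PySem.Int.toStr (i - 26) else String.singleton (Char.ofNat (i + 97).toNat)]) [])

-- ===== PRECONDITION & SPEC =====
-- Pre_ admits exactly the inputs on which Python A returns: each element of a must be a
-- lowercase-led string in ["a","z"] or parse as an int (else ValueError/IndexError); the
-- resulting code must either occur in c[:36] or c must have ≥ 36 entries (else the while
-- loop raises IndexError); and when the code stays unmatched and ≤ 25 it must give
-- chr a nonnegative argument (else ValueError).
def Pre_trans_f (a : List String) (c : List Int) : Prop :=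
  ∀ s ∈ a,
    if "a".toList ≤ s.toList ∧ s.toList ≤ "z".toList then
      ((((PySem.List.pyGet? s.toList 0).getD 'a').toNat : Int) - 97 ∈ c.take 36 ∨ 36 ≤ c.length)
    else
      PySem.Int.ofStr? s ≠ none ∧
      (((PySem.Int.ofStr? s).getD 0 + 26 ∈ c.take 36 ∨ 36 ≤ c.length) ∧
       ((PySem.Int.ofStr? s).getD 0 + 26 ∈ c.take 36 ∨ -123 ≤ (PySem.Int.ofStr? s).getD 0))
instance (a : List String) (c : List Int) : Decidable (Pre_trans_f a c) := by
  unfold Pre_trans_f; infer_instance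

def pvWitness_trans_f : List String × List Int := (["a", "5"], [31, 0])

def Spec_trans_f (a : List String) (c : List Int) (out : String) : Prop := out = trans_f_alt a c
instance (a : List String) (c : List Int) (out : String) : Decidable (Spec_trans_f a c out) := by unfold Spec_trans_f; infer_instance

-- ===== CLAIM (what is proved, stated in full; the proofs are below) =====
def Claim_equal_trans_f : Prop := ∀ (a : List String) (c : List Int), Dom_trans_f a c → Pre_trans_f a c → Spec_trans_f a c (trans_f a c)

-- ===== LEMMAS AND PROOFS =====

-- the Boolean lexicographic strict order sorted2 sorts by (its 'lt' with k1 = fst, k2 = snd)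
def pvLtB (a b : Int × Int) : Bool :=
  decide (a.1 < b.1) || (!decide (b.1 < a.1) && decide (a.2 < b.2))

-- sorted2 at our arguments is the insertion-sort foldl over pvLtB
theorem pvBVals_eq_foldl (xs : List (Int × Int)) :
    PySem.List.sorted2 xs (·.1) (·.2) = xs.foldl (fun acc x => PySem.List.insertBy pvLtB x acc) [] := by
  rfl

theorem pvLtB_true_iff (a b : Int × Int) :
    pvLtB a b = true ↔ (a.1 < b.1 ∨ (¬ b.1 < a.1 ∧ a.2 < b.2)) := by
  simp [pvLtB]

theorem pvLtB_false_iff (a b : Int × Int) :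
    pvLtB a b = false ↔ ¬ (a.1 < b.1 ∨ (¬ b.1 < a.1 ∧ a.2 < b.2)) := by
  rw [← Bool.not_eq_true, pvLtB_true_iff]

theorem pvLtB_asymm {a b : Int × Int} (h : pvLtB a b = true) : pvLtB b a = false := by
  rw [pvLtB_true_iff] at h; rw [pvLtB_false_iff]; omega

theorem pvLtB_trans_left {x y z : Int × Int} (h1 : pvLtB x y = true) (h2 : pvLtB z y = false) :
    pvLtB z x = false := by
  rw [pvLtB_true_iff] at h1; rw [pvLtB_false_iff] at h2 ⊢; omega

-- insertion preserves pairwise non-inversion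
theorem pvInsertBy_pairwise (x : Int × Int) (l : List (Int × Int))
    (h : l.Pairwise (fun a b => pvLtB b a = false)) :
    (PySem.List.insertBy pvLtB x l).Pairwise (fun a b => pvLtB b a = false) := by
  induction l with
  | nil => simp [PySem.List.insertBy]
  | cons y ys ih =>
    rw [List.pairwise_cons] at h
    by_cases hxy : pvLtB x y = true
    · have : PySem.List.insertBy pvLtB x (y :: ys) = x :: y :: ys := by
        simp [PySem.List.insertBy, hxy]
      rw [this, List.pairwise_cons]
      constructor
      · intro z hz
        rcases List.mem_cons.mp hz with rfl | hz
        · exact pvLtB_asymm hxy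
        · exact pvLtB_trans_left hxy (h.1 z hz)
      · rw [List.pairwise_cons]; exact h
    · have hxy' : pvLtB x y = false := by simpa using hxy
      have : PySem.List.insertBy pvLtB x (y :: ys) = y :: PySem.List.insertBy pvLtB x ys := by
        simp [PySem.List.insertBy, hxy']
      rw [this, List.pairwise_cons]
      refine ⟨?_, ih h.2⟩
      intro z hz
      rcases (PySem.List.mem_insertBy pvLtB x z ys).mp hz with rfl | hz
      · exact hxy'
      · exact h.1 z hz

theorem pvFoldl_pairwise (l : List (Int × Int)) (init : List (Int × Int))
    (h : init.Pairwise (fun a b => pvLtB b a = false)) :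
    (l.foldl (fun acc x => PySem.List.insertBy pvLtB x acc) init).Pairwise
      (fun a b => pvLtB b a = false) := by
  induction l generalizing init with
  | nil => exact h
  | cons x xs ih => exact ih _ (pvInsertBy_pairwise x init h)

theorem pvBVals_pairwise (c : List Int) :
    (pvBVals c).Pairwise (fun a b => pvLtB b a = false) := by
  rw [pvBVals, pvBVals_eq_foldl]
  exact pvFoldl_pairwise _ [] List.Pairwise.nil

-- B's hand-written binary-search loop is bisect_left
theorem pvBLoop_eq_loop (keys : List Int) (i : Int) (fuel lo hi : Nat)
    (hhi : hi ≤ keys.length) (hf : hi - lo ≤ fuel) :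
    pvBLoop keys i lo hi = PySem.List.bisectLeftLoop keys i fuel lo hi := by
  induction fuel generalizing lo hi with
  | zero =>
    rw [pvBLoop]
    have : ¬ lo < hi := by omega
    simp [PySem.List.bisectLeftLoop, this]
  | succ n ih =>
    rw [pvBLoop, PySem.List.bisectLeftLoop]
    by_cases hlt : lo < hi
    · have hmid : (lo + hi) / 2 < keys.length := by omega
      have hget : keys[(lo + hi) / 2]? = some keys[(lo + hi) / 2] := List.getElem?_eq_getElem hmid
      have hpy : (PySem.List.pyGet? keys (((lo + hi) / 2 : Nat) : Int)).getD 0 = keys[(lo + hi) / 2] := by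
        rw [PySem.List.pyGet?_natCast]
        simp [hmid]
      rw [if_pos hlt, if_pos hlt, hget, hpy]
      dsimp only
      by_cases hc : keys[(lo + hi) / 2] < i
      · rw [if_pos hc, if_pos hc, ih _ _ hhi (by omega)]
      · rw [if_neg hc, if_neg hc, ih _ _ (by omega) (by omega)]
    · simp [hlt]

theorem pvBLoop_eq_bisectLeft (keys : List Int) (i : Int) :
    pvBLoop keys i 0 keys.length = PySem.List.bisectLeft keys i :=
  pvBLoop_eq_loop keys i keys.length 0 keys.length le_rfl (by omega)

-- the pairs B sorts: membership characterisation
theorem pvMem_pairs (c : List Int) (p : Int × Int) :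
    p ∈ (PySem.List.enumerate (c.take 36)).map (fun ex => (ex.2, ex.1)) ↔
      ∃ (k : Nat) (hk : k < (c.take 36).length), p = ((c.take 36)[k], (k : Int)) := by
  constructor
  · intro hp
    rcases List.mem_map.mp hp with ⟨ex, hex, hpe⟩
    rcases (PySem.List.mem_enumerate_iff _ _ _).mp hex with ⟨k, hk, hek⟩
    exact ⟨k, hk, by simp [← hpe, hek]⟩
  · rintro ⟨k, hk, rfl⟩
    exact List.mem_map.mpr ⟨((k : Int), (c.take 36)[k]),
      (PySem.List.mem_enumerate_iff _ _ _).mpr ⟨k, hk, by simp⟩, rfl⟩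

-- B's lookup computes A's while-loop value (the first index of i in c[:36], else i)
-- the sorted pair list, projected to its keys, is a permutation of c[:36]
theorem pvKeys_perm (c : List Int) : ((pvBVals c).map (·.1)).Perm (c.take 36) := by
  have hslice : PySem.List.slice c none (some 36) = c.take 36 := by
    have := PySem.List.slice_to_natCast (xs := c) (b := 36)
    simpa using this
  have hperm : (pvBVals c).Perm
      ((PySem.List.enumerate (c.take 36)).map (fun ex => (ex.2, ex.1))) := by
    unfold pvBVals; rw [hslice]; exact PySem.List.sorted2_perm _ _ _ _
  have h1 := hperm.map (·.1)
  rw [List.map_map] at h1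
  have h2 : (PySem.List.enumerate (c.take 36)).map ((·.1) ∘ (fun ex => (ex.2, ex.1)))
      = c.take 36 := PySem.List.map_snd_enumerate (c.take 36) 0
  rwa [h2] at h1

theorem pvBVals_perm (c : List Int) : (pvBVals c).Perm
    ((PySem.List.enumerate (c.take 36)).map (fun ex => (ex.2, ex.1))) := by
  have hslice : PySem.List.slice c none (some 36) = c.take 36 := by
    have := PySem.List.slice_to_natCast (xs := c) (b := 36)
    simpa using this
  unfold pvBVals; rw [hslice]; exact PySem.List.sorted2_perm _ _ _ _

-- B's lookup computes A's while-loop value (the first index of i in c[:36], else i)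
theorem pvBLookup_spec (c : List Int) (i : Int) :
    pvBLookup (pvBVals c) ((pvBVals c).map (·.1)) i
      = if _h : i ∈ c.take 36 then ((c.take 36).idxOf i : Int) else i := by
  have hperm := pvBVals_perm c
  have hkt := pvKeys_perm c
  have hpw := pvBVals_pairwise c
  have hsorted : (((pvBVals c).map (·.1)) : List Int).Pairwise (· ≤ ·) := by
    rw [List.pairwise_map]
    exact hpw.imp (fun {a b} h => by rw [pvLtB_false_iff] at h; omega)
  obtain ⟨hle, hlt, hge⟩ := PySem.List.bisectLeft_spec _ i hsorted
  simp only [pvBLookup, pvBLoop_eq_bisectLeft]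
  by_cases hmem : i ∈ c.take 36
  · rw [dif_pos hmem]
    have hmlt : (c.take 36).idxOf i < (c.take 36).length := List.idxOf_lt_length_of_mem hmem
    have hgm : (c.take 36)[(c.take 36).idxOf i] = i := List.getElem_idxOf hmlt
    have him : (i, ((c.take 36).idxOf i : Int)) ∈
        (PySem.List.enumerate (c.take 36)).map (fun ex => (ex.2, ex.1)) :=
      (pvMem_pairs c _).mpr ⟨(c.take 36).idxOf i, hmlt, by rw [hgm]⟩
    have hips : (i, ((c.take 36).idxOf i : Int)) ∈ pvBVals c := hperm.mem_iff.mpr him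
    obtain ⟨j, hj, hpsj⟩ := List.getElem_of_mem hips
    have hjk : j < ((pvBVals c).map (·.1)).length := by simpa using hj
    have hkeysj : ((pvBVals c).map (·.1))[j]'hjk = i := by
      simp [List.getElem_map, hpsj]
    have hloj : PySem.List.bisectLeft ((pvBVals c).map (·.1)) i ≤ j := by
      by_contra hgt
      have := hlt j hjk (by omega)
      rw [hkeysj] at this
      omega
    have hlolen : PySem.List.bisectLeft ((pvBVals c).map (·.1)) i
        < ((pvBVals c).map (·.1)).length := by omega
    have hkeyslo_ge : i ≤ ((pvBVals c).map (·.1))[PySem.List.bisectLeft ((pvBVals c).map (·.1)) i]'hlolen :=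
      hge _ hlolen le_rfl
    have hkeyslo_le : ((pvBVals c).map (·.1))[PySem.List.bisectLeft ((pvBVals c).map (·.1)) i]'hlolen
        ≤ ((pvBVals c).map (·.1))[j]'hjk := by
      rcases Nat.lt_or_ge (PySem.List.bisectLeft ((pvBVals c).map (·.1)) i) j with hlj | hlj
      · exact (List.pairwise_iff_getElem.mp hsorted) _ _ hlolen hjk hlj
      · have heq : PySem.List.bisectLeft ((pvBVals c).map (·.1)) i = j := by omega
        exact le_of_eq (getElem_congr rfl heq hlolen)
    have hkeyslo : ((pvBVals c).map (·.1))[PySem.List.bisectLeft ((pvBVals c).map (·.1)) i]'hlolen = i := by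
      rw [hkeysj] at hkeyslo_le; omega
    rw [if_pos hlolen]
    have hgetk : (PySem.List.pyGet? ((pvBVals c).map (·.1))
        ((PySem.List.bisectLeft ((pvBVals c).map (·.1)) i : Nat) : Int)).getD 0
        = ((pvBVals c).map (·.1))[PySem.List.bisectLeft ((pvBVals c).map (·.1)) i]'hlolen := by
      rw [PySem.List.pyGet?_natCast]
      simp [List.getElem?_eq_getElem (show PySem.List.bisectLeft ((pvBVals c).map (·.1)) i < (pvBVals c).length by simpa using hlolen)]
    rw [hgetk, if_pos hkeyslo]
    have hlolen' : PySem.List.bisectLeft ((pvBVals c).map (·.1)) i < (pvBVals c).length := by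
      simpa using hlolen
    have hgetv : (PySem.List.pyGet? (pvBVals c)
        ((PySem.List.bisectLeft ((pvBVals c).map (·.1)) i : Nat) : Int)).getD (0, 0)
        = (pvBVals c)[PySem.List.bisectLeft ((pvBVals c).map (·.1)) i]'hlolen' := by
      rw [PySem.List.pyGet?_natCast]
      simp [hlolen']
    rw [hgetv]
    -- the pair at position lo comes from the enumeration: it is ((c.take 36)[k], k)
    have hmemlo : (pvBVals c)[PySem.List.bisectLeft ((pvBVals c).map (·.1)) i]'hlolen'
        ∈ (PySem.List.enumerate (c.take 36)).map (fun ex => (ex.2, ex.1)) :=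
      hperm.mem_iff.mp (List.getElem_mem _)
    obtain ⟨k, hk, hplo⟩ := (pvMem_pairs c _).mp hmemlo
    have hfst : ((pvBVals c)[PySem.List.bisectLeft ((pvBVals c).map (·.1)) i]'hlolen').1 = i := by
      have h := hkeyslo
      simp only [List.getElem_map] at h
      exact h
    have htk : (c.take 36)[k] = i := by rw [hplo] at hfst; exact hfst
    -- minimality of idxOf: idxOf i ≤ k
    have hmk : (c.take 36).idxOf i ≤ k := by
      have hitake : i ∈ (c.take 36).take (k + 1) := by
        have : ((c.take 36).take (k + 1))[k]'(by have hk' := hk; simp [List.length_take] at hk' ⊢; omega) = i := by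
          simp [List.getElem_take, htk]
        rw [← this]; exact List.getElem_mem _
      have := (List.mem_take_iff_idxOf_lt hmem).mp hitake
      omega
    -- and k ≤ idxOf i: the pair (i, idxOf i) cannot come strictly later in the sorted list
    have hkm : k ≤ (c.take 36).idxOf i := by
      rcases Nat.lt_or_ge (PySem.List.bisectLeft ((pvBVals c).map (·.1)) i) j with hlj | hlj
      · have hR := (List.pairwise_iff_getElem.mp hpw) _ _ hlolen' hj hlj
        rw [pvLtB_false_iff, hpsj, hplo] at hR
        dsimp only at hR
        omega
      · have heq : PySem.List.bisectLeft ((pvBVals c).map (·.1)) i = j := by omega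
        have h3 : (pvBVals c)[PySem.List.bisectLeft ((pvBVals c).map (·.1)) i]'hlolen'
            = (i, ((c.take 36).idxOf i : Int)) := (getElem_congr rfl heq hlolen').trans hpsj
        have h4 := hplo.symm.trans h3
        rw [Prod.mk.injEq] at h4
        omega
    have hkeq : k = (c.take 36).idxOf i := by omega
    rw [hplo]
    simp [hkeq]
  · rw [dif_neg hmem]
    have hnk : i ∉ (pvBVals c).map (·.1) := fun h => hmem (hkt.mem_iff.mp h)
    by_cases hlo : PySem.List.bisectLeft ((pvBVals c).map (·.1)) i < ((pvBVals c).map (·.1)).length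
    · rw [if_pos hlo]
      have hgetk : (PySem.List.pyGet? ((pvBVals c).map (·.1))
          ((PySem.List.bisectLeft ((pvBVals c).map (·.1)) i : Nat) : Int)).getD 0
          = ((pvBVals c).map (·.1))[PySem.List.bisectLeft ((pvBVals c).map (·.1)) i]'hlo := by
        rw [PySem.List.pyGet?_natCast]
        simp [List.getElem?_eq_getElem (show PySem.List.bisectLeft ((pvBVals c).map (·.1)) i < (pvBVals c).length by simpa using hlo)]
      rw [hgetk, if_neg (fun h => hnk (by rw [← h]; exact List.getElem_mem hlo))]
    · rw [if_neg hlo]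

-- a.foldl with singleton appends builds a.map
theorem trans_f_foldl (a : List String) (cs : List Int) :
    trans_f a cs = PySem.Str.join "" (a.map (fun s =>
      let i := pvAWhile cs (pvAIdx s) 0
      if i > 25 then PySem.Int.toStr (i - 26)
      else String.singleton (Char.ofNat (i + 97).toNat))) := by
  unfold trans_f
  rw [PySem.List.foldl_append_singleton_eq_map]
  simp

theorem trans_f_alt_foldl (a : List String) (cs : List Int) :
    trans_f_alt a cs = PySem.Str.join "" (a.map (fun s =>
      let i := pvBLookup (pvBVals cs) ((pvBVals cs).map (·.1)) (pvBIdx s)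
      if i > 25 then PySem.Int.toStr (i - 26)
      else String.singleton (Char.ofNat (i + 97).toNat))) := by
  unfold trans_f_alt
  dsimp only
  rw [PySem.List.foldl_append_singleton_eq_map]
  simp

-- A's while-loop computes the same value, given that it terminates without IndexError
theorem pvAWhile_spec (cs : List Int) (i : Int) (e : Nat) (he : e ≤ 36)
    (h : i ∈ (cs.take 36).drop e ∨ 36 ≤ cs.length) :
    pvAWhile cs i e
      = if _hm : i ∈ (cs.take 36).drop e
        then ((e : Int) + (((cs.take 36).drop e).idxOf i : Int)) else i := by
  by_cases hlt : e < 36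
  · have hel : e < cs.length := by
      rcases h with hmem | hlen
      · by_contra hge
        have : (cs.take 36).length ≤ e := by
          simp [List.length_take]; omega
        rw [List.drop_eq_nil_of_le this] at hmem
        exact absurd hmem (List.not_mem_nil)
      · omega
    have hget : (PySem.List.pyGet? cs (e : Int)).getD 0 = cs[e] := by
      rw [PySem.List.pyGet?_natCast]
      simp [hel]
    have hdrop : (cs.take 36).drop e = cs[e] :: (cs.take 36).drop (e + 1) := by
      have hlt' : e < (cs.take 36).length := by simp [List.length_take]; omega
      rw [List.drop_eq_getElem_cons hlt']
      simp [List.getElem_take]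
    rw [pvAWhile, if_pos hlt, hget]
    by_cases hc : cs[e] = i
    · rw [if_pos hc]
      have hm : i ∈ (cs.take 36).drop e := by rw [hdrop, hc]; exact List.mem_cons_self
      rw [dif_pos hm]
      have : ((cs.take 36).drop e).idxOf i = 0 := by rw [hdrop, hc, List.idxOf_cons_self]
      rw [this]; simp
    · rw [if_neg hc]
      have hnext : i ∈ (cs.take 36).drop (e + 1) ∨ 36 ≤ cs.length := by
        rcases h with hmem | hlen
        · left
          rw [hdrop] at hmem
          rcases List.mem_cons.mp hmem with h1 | h1
          · exact absurd h1.symm hc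
          · exact h1
        · right; exact hlen
      rw [pvAWhile_spec cs i (e + 1) (by omega) hnext]
      by_cases hm1 : i ∈ (cs.take 36).drop (e + 1)
      · have hm : i ∈ (cs.take 36).drop e := by rw [hdrop]; exact List.mem_cons_of_mem _ hm1
        rw [dif_pos hm1, dif_pos hm]
        have : ((cs.take 36).drop e).idxOf i = ((cs.take 36).drop (e + 1)).idxOf i + 1 := by
          rw [hdrop]; exact List.idxOf_cons_ne _ hc
        rw [this]; push_cast; ring
      · have hm : i ∉ (cs.take 36).drop e := by
          rw [hdrop]
          intro hmem
          rcases List.mem_cons.mp hmem with h1 | h1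
          · exact hc h1.symm
          · exact hm1 h1
        rw [dif_neg hm1, dif_neg hm]
  · have he36 : e = 36 := by omega
    have hnil : (cs.take 36).drop e = [] := by
      apply List.drop_eq_nil_of_le; simp [List.length_take]; omega
    rw [pvAWhile, if_neg hlt, hnil]
    simp

-- per-element agreement under Pre_'s per-element condition
theorem pvConv_eq (cs : List Int) (s : String)
    (hp : if "a".toList ≤ s.toList ∧ s.toList ≤ "z".toList then
            ((((PySem.List.pyGet? s.toList 0).getD 'a').toNat : Int) - 97 ∈ cs.take 36 ∨ 36 ≤ cs.length)
          else
            PySem.Int.ofStr? s ≠ none ∧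
            (((PySem.Int.ofStr? s).getD 0 + 26 ∈ cs.take 36 ∨ 36 ≤ cs.length) ∧
             ((PySem.Int.ofStr? s).getD 0 + 26 ∈ cs.take 36 ∨ -123 ≤ (PySem.Int.ofStr? s).getD 0))) :
    pvAWhile cs (pvAIdx s) 0 = pvBLookup (pvBVals cs) ((pvBVals cs).map (·.1)) (pvBIdx s) := by
  have hidx : pvBIdx s = pvAIdx s := rfl
  have hreach : pvAIdx s ∈ (cs.take 36).drop 0 ∨ 36 ≤ cs.length := by
    rw [List.drop_zero]
    unfold pvAIdx
    by_cases hlz : "a".toList ≤ s.toList ∧ s.toList ≤ "z".toList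
    · rw [if_pos hlz] at hp ⊢; exact hp
    · rw [if_neg hlz] at hp ⊢; exact hp.2.1
  have hA := pvAWhile_spec cs (pvAIdx s) 0 (by omega) hreach
  rw [List.drop_zero] at hA
  rw [hidx, pvBLookup_spec cs (pvAIdx s), hA]
  simp

-- ===== VERDICT (by name: the statement is the Claim_ definition above) =====
theorem trans_f_spec : Claim_equal_trans_f := by
  intro a cs _hdom hpre
  unfold Spec_trans_f
  rw [trans_f_foldl, trans_f_alt_foldl]
  congr 1
  apply List.map_congr_left
  intro s hs
  simp only []
  rw [pvConv_eq cs s (hpre s hs)]
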